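-- pv_equiv track=rewrite | github.com/dsavoiu/Karma | PostProcessing/python/Plotting/_plot.py | _merge_legend_handles_labels
-- ===== SOURCE A (Python) =====
-- def _merge_legend_handles_labels(handles, labels):
--     '''merge handles for identical labels'''
--     _seen_labels = []
--     _seen_label_handles = []
--     _new_label_indices = []
--     for _ihl, (_h, _l) in enumerate(zip(handles, labels)):
--         if _l not in _seen_labels:
--             _seen_labels.append(_l)
--             _seen_label_handles.append([_h])
--         else:
--             _idx = _seen_labels.index(_l)
--             _seen_label_handles[_idx].append(_h)
--
--     for _i, (_sh, _sl) in enumerate(zip(_seen_label_handles, _seen_labels)):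
--         _seen_label_handles[_i] = tuple(_seen_label_handles[_i])
--
--     return _seen_label_handles, _seen_labels
-- ===== SOURCE B (Python) =====
-- def _merge_legend_handles_labels(handles, labels):
--     '''merge handles for identical labels'''
--     pairs = list(zip(handles, labels))
--     unique_labels = []
--     for _, _l in pairs:
--         if _l not in unique_labels:
--             unique_labels.append(_l)
--     grouped = [tuple(_h for _h, _l in pairs if _l == _ul) for _ul in unique_labels]
--     return grouped, unique_labels
-- ===== Notes on version B (the rewrite author's own statement) =====
-- stated objective: idiomatic
-- what changed: Replaced the single accumulating pass (seen-list with list.index lookups and in-place group mutation) by a dedup pass over the zipped pairs followed by one filtering comprehension per unique label.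
import Mathlib
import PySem

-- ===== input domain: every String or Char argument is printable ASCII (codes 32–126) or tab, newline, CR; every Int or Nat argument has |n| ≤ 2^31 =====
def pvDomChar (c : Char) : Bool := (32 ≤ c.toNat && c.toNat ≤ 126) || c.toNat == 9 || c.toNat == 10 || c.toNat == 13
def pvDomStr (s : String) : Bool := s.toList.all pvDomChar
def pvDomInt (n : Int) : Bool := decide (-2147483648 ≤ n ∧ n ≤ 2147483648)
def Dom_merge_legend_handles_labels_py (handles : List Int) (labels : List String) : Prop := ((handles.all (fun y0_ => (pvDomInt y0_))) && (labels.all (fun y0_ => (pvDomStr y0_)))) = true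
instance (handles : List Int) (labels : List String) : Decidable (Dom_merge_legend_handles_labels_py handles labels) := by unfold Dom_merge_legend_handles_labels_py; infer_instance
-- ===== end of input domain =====

-- B replaces A's single accumulating pass (seen-list + index lookups + in-place group
-- mutation) by an ordered dedup of the labels followed by one filtering scan per unique
-- label (idiomatic; same output, same asymptotic cost).


-- ===== PORT A =====
-- one iteration of A's first loop; state = (_seen_labels, _seen_label_handles)
def pvAStep (st : List String × List (List Int)) (p : Int × String) : List String × List (List Int) :=
  if p.2 ∉ st.1 then
    (st.1 ++ [p.2], st.2 ++ [[p.1]])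
  else
    match PySem.List.index? st.1 p.2 with
    | some i => (st.1, st.2.set i ((st.2.getD i []) ++ [p.1]))
    | none => st  -- unreachable: guarded by the membership test above

def merge_legend_handles_labels_py (handles : List Int) (labels : List String) : List (List Int) × List String :=
  let st := (List.zip handles labels).foldl pvAStep ([], [])
  -- A's second loop converts each group list to a tuple, which is the identity
  -- under the List encoding of Python tuples used here
  (st.2, st.1)

-- ===== PORT B =====
def pvUniq (pairs : List (Int × String)) : List String :=
  pairs.foldl (fun acc p => if p.2 ∈ acc then acc else acc ++ [p.2]) []

def pvGroup (pairs : List (Int × String)) (l : String) : List Int :=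
  (pairs.filter (fun p => decide (p.2 = l))).map Prod.fst

def merge_legend_handles_labels_py_alt (handles : List Int) (labels : List String) : List (List Int) × List String :=
  let pairs := List.zip handles labels
  let u := pvUniq pairs
  (u.map (pvGroup pairs), u)

-- ===== PRECONDITION & SPEC =====
def Spec_merge_legend_handles_labels_py (handles : List Int) (labels : List String) (out : List (List Int) × List String) : Prop := out = merge_legend_handles_labels_py_alt handles labels
instance (handles : List Int) (labels : List String) (out : List (List Int) × List String) : Decidable (Spec_merge_legend_handles_labels_py handles labels out) := by unfold Spec_merge_legend_handles_labels_py; infer_instance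

-- ===== CLAIM (what is proved, stated in full; the proofs are below) =====
def Claim_equal_merge_legend_handles_labels_py : Prop := ∀ (handles : List Int) (labels : List String), Dom_merge_legend_handles_labels_py handles labels → Spec_merge_legend_handles_labels_py handles labels (merge_legend_handles_labels_py handles labels)

-- ===== LEMMAS AND PROOFS =====

lemma mem_pvUniq_foldl (pairs : List (Int × String)) :
    ∀ (acc : List String) (x : String),
      x ∈ pairs.foldl (fun acc p => if p.2 ∈ acc then acc else acc ++ [p.2]) acc ↔
        x ∈ acc ∨ x ∈ pairs.map Prod.snd := by
  induction pairs with
  | nil => simp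
  | cons p ps ih =>
    intro acc x
    simp only [List.foldl_cons, List.map_cons, List.mem_cons]
    rw [ih]
    by_cases h : p.2 ∈ acc
    · rw [if_pos h]
      constructor
      · tauto
      · rintro (hx | hx | hx)
        · exact Or.inl hx
        · exact Or.inl (hx ▸ h)
        · exact Or.inr hx
    · rw [if_neg h]
      simp only [List.mem_append, List.mem_singleton]
      tauto

lemma mem_pvUniq (pairs : List (Int × String)) (x : String) :
    x ∈ pvUniq pairs ↔ x ∈ pairs.map Prod.snd := by
  unfold pvUniq; rw [mem_pvUniq_foldl]; simp

lemma nodup_pvUniq_foldl (pairs : List (Int × String)) :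
    ∀ (acc : List String), acc.Nodup →
      (pairs.foldl (fun acc p => if p.2 ∈ acc then acc else acc ++ [p.2]) acc).Nodup := by
  induction pairs with
  | nil => intro acc h; simpa using h
  | cons p ps ih =>
    intro acc h
    simp only [List.foldl_cons]
    by_cases hm : p.2 ∈ acc
    · simpa [hm] using ih acc h
    · rw [if_neg hm]
      refine ih _ ?_
      simp [List.nodup_append, h]
      exact fun a ha hap => hm (hap ▸ ha)

lemma nodup_pvUniq (pairs : List (Int × String)) : (pvUniq pairs).Nodup :=
  nodup_pvUniq_foldl pairs [] List.nodup_nil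

lemma pvGroup_append (pairs : List (Int × String)) (p : Int × String) (l : String) :
    pvGroup (pairs ++ [p]) l = pvGroup pairs l ++ (if p.2 = l then [p.1] else []) := by
  unfold pvGroup
  rw [List.filter_append]
  by_cases h : p.2 = l <;> simp [h]

lemma map_set_of_nodup {α β : Type} [DecidableEq α] (u : List α) (f g : α → β) :
    ∀ (i : Nat) (l : α), u.Nodup → u[i]? = some l →
      (u.map f).set i (g l) = u.map (fun x => if x = l then g x else f x) := by
  induction u with
  | nil => intro i l _ h; simp at h
  | cons a us ih =>
    intro i l hnd h
    cases i with
    | zero =>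
      simp only [List.getElem?_cons_zero, Option.some.injEq] at h
      subst h
      simp only [List.map_cons, List.set_cons_zero]
      congr 1
      refine (List.map_congr_left ?_).symm
      intro x hx
      have : x ≠ a := fun hxa => (List.nodup_cons.mp hnd).1 (hxa ▸ hx)
      simp [this]
    | succ n =>
      simp only [List.getElem?_cons_succ] at h
      have hl : l ∈ us := List.mem_of_getElem? h
      have hne : a ≠ l := fun hal => (List.nodup_cons.mp hnd).1 (hal ▸ hl)
      simp only [List.map_cons, List.set_cons_succ, if_neg hne]
      rw [ih n l (List.nodup_cons.mp hnd).2 h]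

lemma pvAStep_not_mem (seen : List String) (grps : List (List Int)) (p : Int × String)
    (h : p.2 ∉ seen) : pvAStep (seen, grps) p = (seen ++ [p.2], grps ++ [[p.1]]) := by
  unfold pvAStep; simp [h]

lemma pvAStep_mem (seen : List String) (grps : List (List Int)) (p : Int × String) (i : Nat)
    (h : p.2 ∈ seen) (hi : PySem.List.index? seen p.2 = some i) :
    pvAStep (seen, grps) p = (seen, grps.set i ((grps.getD i []) ++ [p.1])) := by
  unfold pvAStep
  rw [PySem.List.index?_eq_idxOf?] at hi
  simp [h, hi]

lemma foldA (pairs : List (Int × String)) :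
    pairs.foldl pvAStep ([], []) = (pvUniq pairs, (pvUniq pairs).map (pvGroup pairs)) := by
  induction pairs using List.reverseRecOn with
  | nil => simp [pvUniq]
  | append_singleton xs p ih =>
    rw [List.foldl_append, ih]
    simp only [List.foldl_cons, List.foldl_nil]
    have huniq : pvUniq (xs ++ [p]) =
        if p.2 ∈ pvUniq xs then pvUniq xs else pvUniq xs ++ [p.2] := by
      unfold pvUniq; rw [List.foldl_append]; rfl
    by_cases hm : p.2 ∈ pvUniq xs
    · -- A takes the index/mutate branch
      obtain ⟨i, hi⟩ := Option.isSome_iff_exists.mp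
        ((PySem.List.index?_isSome_iff (pvUniq xs) p.2).mpr hm)
      obtain ⟨hk, hget, _⟩ := PySem.List.getElem_of_index?_eq_some hi
      have hgetD : ((pvUniq xs).map (pvGroup xs)).getD i [] = pvGroup xs p.2 := by
        simp [List.getD, List.getElem?_map, List.getElem?_eq_getElem hk, hget]
      rw [pvAStep_mem _ _ _ _ hm hi, hgetD, huniq, if_pos hm]
      rw [map_set_of_nodup (pvUniq xs) (pvGroup xs) (fun x => pvGroup xs x ++ [p.1]) i p.2
        (nodup_pvUniq xs) (by rw [List.getElem?_eq_getElem hk, hget])]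
      refine congrArg (Prod.mk _) ?_
      refine List.map_congr_left ?_
      intro x hx
      rw [pvGroup_append]
      by_cases hxp : x = p.2
      · subst hxp; simp
      · have h1 : ¬ p.2 = x := fun h => hxp h.symm
        simp [hxp, h1]
    · -- A takes the append branch
      have hnotlab : p.2 ∉ xs.map Prod.snd := fun h => hm ((mem_pvUniq xs p.2).mpr h)
      have hempty : pvGroup xs p.2 = [] := by
        unfold pvGroup
        rw [List.filter_eq_nil_iff.mpr, List.map_nil]
        intro q hq
        simp only [decide_eq_true_eq]
        exact fun h => hnotlab (h ▸ List.mem_map_of_mem hq)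
      rw [pvAStep_not_mem _ _ _ hm, huniq, if_neg hm]
      have hlast : pvGroup (xs ++ [p]) p.2 = [p.1] := by
        rw [pvGroup_append, hempty]; simp
      have hrest : List.map (pvGroup (xs ++ [p])) (pvUniq xs) = List.map (pvGroup xs) (pvUniq xs) := by
        refine List.map_congr_left ?_
        intro x hx
        rw [pvGroup_append]
        have h2 : ¬ p.2 = x := fun h => hm (h ▸ hx)
        simp [h2]
      rw [List.map_append, List.map_singleton, hlast, hrest]

-- ===== VERDICT (by name: the statement is the Claim_ definition above) =====
theorem merge_legend_handles_labels_py_spec : Claim_equal_merge_legend_handles_labels_py := by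
  intro handles labels _
  unfold Spec_merge_legend_handles_labels_py merge_legend_handles_labels_py merge_legend_handles_labels_py_alt
  rw [foldA]
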